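-- pv_equiv track=rewrite | github.com/alexmensch/nido-python | app/lib/Nido.py | list_modes
-- ===== SOURCE A (Python) =====
-- from enum import Enum
--
-- class Mode(Enum):
--     Off = 0
--     Heat = 1
--     Cool = 2
--     Heat_Cool = 3
--
-- def list_modes(modes_available):
--     modes = [ Mode.Off.name ]
--     heat = False
--     cool = False
--
--     for mode in modes_available:
--         if mode[1] is True:
--             if mode[0] == Mode.Heat.name:
--                 heat = True
--             elif mode[0] == Mode.Cool.name:
--                 cool = True
--             modes.append(mode[0])
--     if heat and cool:
--         modes.append(Mode.Heat_Cool.name)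
--     return modes
-- ===== SOURCE B (Python) =====
-- def list_modes(modes_available):
--     def go(items, heat, cool):
--         if not items:
--             return ["Heat_Cool"] if heat and cool else []
--         (name, enabled), rest = items[0], items[1:]
--         if enabled is True:
--             return [name] + go(rest, heat or name == "Heat", cool or name == "Cool")
--         return go(rest, heat, cool)
--     return ["Off"] + go(modes_available, False, False)
-- ===== Notes on version B (the rewrite author's own statement) =====
-- stated objective: alternative
-- what changed: Replaces the imperative loop that appends to a mutable list and then post-appends Heat_Cool with a recursive function that builds the output by consing and emits Heat_Cool at the base case from flags threaded down the recursion.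
import Mathlib
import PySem

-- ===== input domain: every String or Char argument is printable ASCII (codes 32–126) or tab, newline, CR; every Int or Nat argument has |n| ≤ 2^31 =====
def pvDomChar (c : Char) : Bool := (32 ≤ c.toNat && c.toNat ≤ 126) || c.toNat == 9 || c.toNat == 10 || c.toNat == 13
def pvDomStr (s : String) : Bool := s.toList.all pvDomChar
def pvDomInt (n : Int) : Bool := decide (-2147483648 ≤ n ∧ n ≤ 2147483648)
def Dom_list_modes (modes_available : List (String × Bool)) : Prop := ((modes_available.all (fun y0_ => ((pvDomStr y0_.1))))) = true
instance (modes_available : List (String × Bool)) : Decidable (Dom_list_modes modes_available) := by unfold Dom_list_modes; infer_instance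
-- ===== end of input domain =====

-- B replaces A's imperative append-accumulator loop (with a post-loop Heat_Cool append) by a
-- recursive function that conses the output and decides Heat_Cool at the base case (objective: alternative).

-- ===== PORT A =====
-- the for-loop with its three pieces of state (modes, heat, cool)
def listModesLoop : List (String × Bool) → List String → Bool → Bool → List String × Bool × Bool
  | [], ms, h, c => (ms, h, c)
  | m :: rest, ms, h, c =>
    if m.2 = true then
      if m.1 = "Heat" then listModesLoop rest (ms ++ [m.1]) true c
      else if m.1 = "Cool" then listModesLoop rest (ms ++ [m.1]) h true
      else listModesLoop rest (ms ++ [m.1]) h c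
    else listModesLoop rest ms h c

def list_modes (modes_available : List (String × Bool)) : List String :=
  let r := listModesLoop modes_available ["Off"] false false
  if r.2.1 && r.2.2 then r.1 ++ ["Heat_Cool"] else r.1

-- ===== PORT B =====
-- recursive helper: conses enabled names, emits Heat_Cool at the base case from the threaded flags
def listModesGo : List (String × Bool) → Bool → Bool → List String
  | [], h, c => if h && c then ["Heat_Cool"] else []
  | (name, en) :: rest, h, c =>
    if en = true then name :: listModesGo rest (h || name == "Heat") (c || name == "Cool")
    else listModesGo rest h c

def list_modes_alt (modes_available : List (String × Bool)) : List String :=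
  "Off" :: listModesGo modes_available false false

-- ===== PRECONDITION & SPEC =====
def Spec_list_modes (modes_available : List (String × Bool)) (out : List String) : Prop := out = list_modes_alt modes_available
instance (modes_available : List (String × Bool)) (out : List String) : Decidable (Spec_list_modes modes_available out) := by unfold Spec_list_modes; infer_instance

-- ===== CLAIM (what is proved, stated in full; the proofs are below) =====
def Claim_equal_list_modes : Prop := ∀ (modes_available : List (String × Bool)), Dom_list_modes modes_available → Spec_list_modes modes_available (list_modes modes_available)

-- ===== LEMMAS AND PROOFS =====
-- characterisation of A's loop: enabled names appended, flags by membership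
lemma listModesLoop_eq (l : List (String × Bool)) (ms : List String) (h c : Bool) :
    listModesLoop l ms h c =
      (ms ++ ((l.filter (fun m => m.2 = true)).map Prod.fst),
       h || ((l.filter (fun m => m.2 = true)).map Prod.fst).contains "Heat",
       c || ((l.filter (fun m => m.2 = true)).map Prod.fst).contains "Cool") := by
  induction l generalizing ms h c with
  | nil => simp [listModesLoop]
  | cons m rest ih =>
    by_cases hb : m.2 = true
    · by_cases hh : m.1 = "Heat"
      · simp [listModesLoop, hb, hh, ih, List.contains_cons]
      · by_cases hc : m.1 = "Cool"
        · simp [listModesLoop, hb, hh, hc, ih, List.contains_cons]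
        · simp [listModesLoop, hb, hh, hc, ih, List.contains_cons]
          constructor
          · cases h <;> simp [List.contains_eq_mem, Ne.symm hh]
          · cases c <;> simp [List.contains_eq_mem, Ne.symm hc]
    · simp [listModesLoop, hb, ih]

-- characterisation of B's recursion: the same enabled names, then Heat_Cool iff flags over the whole list
lemma listModesGo_eq (l : List (String × Bool)) (h c : Bool) :
    listModesGo l h c =
      ((l.filter (fun m => m.2 = true)).map Prod.fst) ++
        (if (h || ((l.filter (fun m => m.2 = true)).map Prod.fst).contains "Heat") &&
            (c || ((l.filter (fun m => m.2 = true)).map Prod.fst).contains "Cool")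
         then ["Heat_Cool"] else []) := by
  induction l generalizing h c with
  | nil => simp [listModesGo]
  | cons m rest ih =>
    obtain ⟨name, en⟩ := m
    by_cases hb : en = true
    · simp only [listModesGo, hb, ih, List.filter_cons,
        List.contains_cons]
      simp [List.contains_eq_mem, @eq_comm String name, or_assoc]
    · simp [listModesGo, hb, ih]

-- ===== VERDICT (by name: the statement is the Claim_ definition above) =====
theorem list_modes_spec : Claim_equal_list_modes := by
  intro ma _
  unfold Spec_list_modes list_modes list_modes_alt
  simp only [listModesLoop_eq, listModesGo_eq]
  split <;> simp_all
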